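-- pv_equiv track=rewrite | github.com/takhyun12/Algorithm-Essential-Training | Review Trainee Code/jyoonab/credit_card.py | solution
-- ===== SOURCE A (Python) =====
-- def solution(n: int) -> bool:
--     result = 0
--     str_n = str(n)
--
--     for i in range(len(str_n)):
--         if i % 2 == 0: # if even
--             temp = int(str_n[i]) * 2
--             if temp > 9:
--                 temp = int(str(temp)[0]) + int(str(temp)[1])
--             result += temp
--         else: # if odd
--             result += int(str_n[i])
--
--     if result % 10 == 0:
--         return True
--
--     return False
-- ===== SOURCE B (Python) =====
-- TABLE = [0, 2, 4, 6, 8, 1, 3, 5, 7, 9]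
--
--
-- def _luhn(ds):
--     if not ds:
--         return 0
--     if len(ds) == 1:
--         return TABLE[ds[0]]
--     return TABLE[ds[0]] + ds[1] + _luhn(ds[2:])
--
--
-- def solution(n: int) -> bool:
--     digits = [int(c) for c in str(n)]
--     return _luhn(digits) % 10 == 0
-- ===== Notes on version B (the rewrite author's own statement) =====
-- stated objective: alternative
-- what changed: A's single index loop over str(n) with an i%2 branch and a str()-round-trip digit reduction is replaced by a two-digits-at-a-time recursion over the digit list that reads the doubled-and-reduced value from a precomputed lookup table.
import Mathlib
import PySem

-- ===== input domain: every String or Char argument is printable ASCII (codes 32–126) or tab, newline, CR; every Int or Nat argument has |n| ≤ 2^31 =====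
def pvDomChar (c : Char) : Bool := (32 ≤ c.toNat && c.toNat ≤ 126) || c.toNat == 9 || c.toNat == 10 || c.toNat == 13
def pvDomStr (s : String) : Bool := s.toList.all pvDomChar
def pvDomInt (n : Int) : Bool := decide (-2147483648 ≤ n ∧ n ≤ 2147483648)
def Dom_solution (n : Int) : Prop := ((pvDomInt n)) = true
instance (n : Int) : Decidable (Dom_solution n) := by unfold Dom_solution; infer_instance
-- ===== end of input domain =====

-- B replaces A's single index loop with an i%2 branch and a string round-trip for the
-- doubled digits by a two-at-a-time recursion over the digit list using a lookup table
-- (objective: alternative decomposition, same cost).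

-- ===== PORT A =====
def solution (n : Int) : Bool :=
  let str_n := PySem.Int.toChars n
  let result := (PySem.List.pyRange 0 (PySem.List.len str_n) 1).foldl
    (fun result i =>
      if PySem.Int.mod i 2 == 0 then
        let temp := (PySem.Int.ofChars? [PySem.List.pyGetD str_n i ' ']).getD 0 * 2
        let temp := if temp > 9 then
            (PySem.Int.ofChars? [PySem.List.pyGetD (PySem.Int.toChars temp) 0 ' ']).getD 0 +
            (PySem.Int.ofChars? [PySem.List.pyGetD (PySem.Int.toChars temp) 1 ' ']).getD 0
          else temp
        result + temp
      else
        result + (PySem.Int.ofChars? [PySem.List.pyGetD str_n i ' ']).getD 0)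
    0
  PySem.Int.mod result 10 == 0

-- ===== PORT B =====
def solutionTable : List Int := [0, 2, 4, 6, 8, 1, 3, 5, 7, 9]

def solutionLuhn : List Int → Int
  | [] => 0
  | [d] => PySem.List.pyGetD solutionTable d 0
  | d1 :: d2 :: rest => PySem.List.pyGetD solutionTable d1 0 + d2 + solutionLuhn rest

def solution_alt (n : Int) : Bool :=
  let digits := (PySem.Int.toChars n).map (fun c => (PySem.Int.ofChars? [c]).getD 0)
  PySem.Int.mod (solutionLuhn digits) 10 == 0

-- ===== PRECONDITION & SPEC =====
-- Pre_ excludes negative n, on which both A and B raise ValueError (int('-') on the leading minus sign).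
def Pre_solution (n : Int) : Prop := 0 ≤ n
instance (n : Int) : Decidable (Pre_solution n) := by unfold Pre_solution; infer_instance
def pvWitness_solution : Int := 59

def Spec_solution (n : Int) (out : Bool) : Prop := out = solution_alt n
instance (n : Int) (out : Bool) : Decidable (Spec_solution n out) := by unfold Spec_solution; infer_instance

-- ===== CLAIM (what is proved, stated in full; the proofs are below) =====
def Claim_equal_solution : Prop := ∀ (n : Int), Dom_solution n → Pre_solution n → Spec_solution n (solution n)

-- ===== LEMMAS AND PROOFS =====

-- the int value of a one-character string (0 for a non-digit; never hit under Pre_)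
def pvToVal (c : Char) : Int := (PySem.Int.ofChars? [c]).getD 0

-- A's even-position computation, as a function of the digit value
def pvEvenVal (v : Int) : Int :=
  let t := v * 2
  if t > 9 then
    (PySem.Int.ofChars? [PySem.List.pyGetD (PySem.Int.toChars t) 0 ' ']).getD 0 +
    (PySem.Int.ofChars? [PySem.List.pyGetD (PySem.Int.toChars t) 1 ' ']).getD 0
  else t

-- alternating-parity checksum of a digit list (true = next position is even)
def pvLuhnAux : Bool → List Int → Int
  | _, [] => 0
  | true, d :: r => pvEvenVal d + pvLuhnAux false r
  | false, d :: r => d + pvLuhnAux true r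

theorem pv_digit_cases (c : Char) (h : c.isDigit = true) :
    c ∈ ['0','1','2','3','4','5','6','7','8','9'] := by
  simp only [Char.isDigit, Bool.and_eq_true, decide_eq_true_eq] at h
  obtain ⟨h1, h2⟩ := h
  have h1' : 48 ≤ c.val.toNat := UInt32.le_iff_toNat_le.mp h1
  have h2' : c.val.toNat ≤ 57 := UInt32.le_iff_toNat_le.mp h2
  interval_cases hv : c.val.toNat <;>
    · have hc : c = Char.ofNat c.val.toNat := (Char.ofNat_toNat c).symm
      rw [hv] at hc
      subst hc
      decide

theorem pv_toVal_bounds (c : Char) (h : c.isDigit = true) :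
    0 ≤ pvToVal c ∧ pvToVal c < 10 := by
  have := pv_digit_cases c h
  fin_cases this <;> decide

theorem pv_chars_digit (n : Int) (h : 0 ≤ n) :
    ∀ c ∈ PySem.Int.toChars n, c.isDigit = true := by
  intro c hc
  unfold PySem.Int.toChars at hc
  rw [if_neg (by omega)] at hc
  exact Nat.isDigit_of_mem_toDigits (by norm_num) (by norm_num) hc

theorem pv_table_eq (d : Int) (h0 : 0 ≤ d) (h9 : d < 10) :
    PySem.List.pyGetD solutionTable d 0 = pvEvenVal d := by
  interval_cases d <;> decide

theorem pv_bside (ds : List Int) (h : ∀ d ∈ ds, 0 ≤ d ∧ d < 10) :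
    solutionLuhn ds = pvLuhnAux true ds := by
  induction ds using solutionLuhn.induct with
  | case1 => rfl
  | case2 d =>
    have := h d (by simp)
    simp [solutionLuhn, pvLuhnAux, pv_table_eq d this.1 this.2]
  | case3 d1 d2 rest ih =>
    have h1 := h d1 (by simp)
    simp only [solutionLuhn, pvLuhnAux, pv_table_eq d1 h1.1 h1.2,
      ih (fun d hd => h d (by simp [hd]))]
    ring

theorem pv_mod2_succ (s : Int) :
    (PySem.Int.mod (s + 1) 2 == 0) = !(PySem.Int.mod s 2 == 0) := by
  rw [PySem.Int.mod_eq_emod_of_pos (by norm_num : (0:Int) < 2),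
    PySem.Int.mod_eq_emod_of_pos (by norm_num : (0:Int) < 2)]
  by_cases h : s % 2 = 0
  · have h1 : (s + 1) % 2 = 1 := by omega
    simp [h, h1]
  · have h0 : s % 2 = 1 := by omega
    have h1 : (s + 1) % 2 = 0 := by omega
    simp [h0, h1]

theorem pv_foldA (l : List Char) (s acc : Int) :
    (PySem.List.enumerate l s).foldl
        (fun r p => if PySem.Int.mod p.1 2 == 0 then r + pvEvenVal (pvToVal p.2)
                    else r + pvToVal p.2) acc
      = acc + pvLuhnAux (PySem.Int.mod s 2 == 0) (l.map pvToVal) := by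
  induction l generalizing s acc with
  | nil => simp [PySem.List.enumerate_nil, pvLuhnAux]
  | cons c t ih =>
    rw [PySem.List.enumerate_cons, List.foldl_cons, ih, pv_mod2_succ]
    cases h : (PySem.Int.mod s 2 == 0)
    · simp [pvLuhnAux]
      ring
    · simp [pvLuhnAux]
      ring

theorem pv_solution_eq (n : Int) :
    solution n =
      (PySem.Int.mod ((PySem.List.enumerate (PySem.Int.toChars n) 0).foldl
          (fun r p => if PySem.Int.mod p.1 2 == 0 then r + pvEvenVal (pvToVal p.2)
                      else r + pvToVal p.2) 0) 10 == 0) := by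
  unfold solution pvEvenVal pvToVal
  rw [PySem.List.enumerate_eq_map_pyRange (d := ' '), List.foldl_map]

-- ===== VERDICT (by name: the statement is the Claim_ definition above) =====
theorem solution_spec : Claim_equal_solution := by
  intro n _ hpre
  unfold Spec_solution
  have hd := pv_chars_digit n hpre
  rw [pv_solution_eq, pv_foldA]
  show (PySem.Int.mod (0 + pvLuhnAux (PySem.Int.mod 0 2 == 0) ((PySem.Int.toChars n).map pvToVal)) 10 == 0)
      = (PySem.Int.mod (solutionLuhn ((PySem.Int.toChars n).map pvToVal)) 10 == 0)
  have h02 : (PySem.Int.mod 0 2 == 0) = true := rfl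
  rw [h02, zero_add, pv_bside]
  intro d hd'
  obtain ⟨c, hc, rfl⟩ := List.mem_map.mp hd'
  exact pv_toVal_bounds c (hd c hc)
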